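-- pv_equiv track=rewrite | github.com/JoshuaDunnink/advent | source/2015/day_5.py | pat1
-- ===== SOURCE A (Python) =====
-- def has_three_check_vowels(line=str):
--     vowels = list("aeiou")
--     count = 0
--     for char in vowels:
--         count += line.count(char)
--
--     if count >= 3:
--         return True
--     else:
--         return False
--
-- def does_not_contain_illegal_characters(line):
--     illegal_characters = ["ab", "cd", "pq", "xy"]
--     if not any(
--         [
--             True if illegal_character in line else False
--             for illegal_character in illegal_characters
--         ]
--     ):
--         return True
--     else:
--         return False
--
-- def has_letter_twice_in_a_row(line):
--     for index, character in enumerate(line):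
--         if (
--             index < len(list(line)) - 1
--             and line.count(character) >= 2
--             and line[index + 1] == character
--         ):
--             return True
--
--     return False
--
-- def pat1(data=list):
--     iterable_lines = data.copy()
--     for line in iterable_lines:
--         if not all(
--             [
--                 does_not_contain_illegal_characters(line),
--                 has_three_check_vowels(line),
--                 has_letter_twice_in_a_row(line),
--             ]
--         ):
--             data.remove(line)
--     return data
-- ===== SOURCE B (Python) =====
-- def pat1(data):
--     kept = []
--     for line in data:
--         vowels = 0
--         double = False
--         bad = False
--         prev = None
--         for ch in line:
--             if ch in 'aeiou':
--                 vowels += 1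
--             if prev == ch:
--                 double = True
--             if prev is not None and (prev, ch) in (('a', 'b'), ('c', 'd'), ('p', 'q'), ('x', 'y')):
--                 bad = True
--             prev = ch
--         if vowels >= 3 and double and not bad:
--             kept.append(line)
--     data[:] = kept
--     return data
-- ===== Notes on version B (the rewrite author's own statement) =====
-- stated objective: faster
-- what changed: Replaces the remove-while-iterating-over-a-copy loop with three library scans per line (vowel counts, substring tests, an enumerate scan with repeated line.count calls) by a single pass per line maintaining a vowel counter, a double flag and a forbidden-pair flag, collecting kept lines and assigning them back with data[:] = kept.
import Mathlib
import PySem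

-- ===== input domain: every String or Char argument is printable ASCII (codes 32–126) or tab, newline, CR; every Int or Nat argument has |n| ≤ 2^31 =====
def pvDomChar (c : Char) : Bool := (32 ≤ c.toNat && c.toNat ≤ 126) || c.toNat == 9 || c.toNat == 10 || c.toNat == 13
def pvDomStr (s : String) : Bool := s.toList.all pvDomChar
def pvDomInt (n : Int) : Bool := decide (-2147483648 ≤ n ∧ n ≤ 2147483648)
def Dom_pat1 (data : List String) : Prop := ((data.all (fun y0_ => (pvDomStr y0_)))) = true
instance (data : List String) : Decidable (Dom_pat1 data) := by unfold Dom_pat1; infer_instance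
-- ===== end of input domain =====

-- B replaces A's remove-while-iterating loop and its three library scans per line by one
-- single pass per line with a vowel counter and two flags; return-value equivalence is proved
-- (both Pythons mutate `data` in place to the same final contents, so the side effect agrees too).

-- B replaces A's remove-while-iterating loop and its three library scans per line by one
-- single pass per line (vowel counter + double flag + forbidden-pair flag); the equivalence
-- proved is about the return value (both Pythons also mutate `data` in place to that same list).

-- ===== PORT A =====
def hasThreeCheckVowels (line : String) : Bool :=
  let vowels := "aeiou".toList
  let count : Int := vowels.foldl (fun c ch => c + (PySem.Str.count line (String.singleton ch) : Int)) 0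
  if 3 ≤ count then true else false

def doesNotContainIllegalCharacters (line : String) : Bool :=
  let illegal := ["ab", "cd", "pq", "xy"]
  if !((illegal.map (fun ic => if PySem.Str.isIn ic line then true else false)).any id) then true
  else false

def hasLetterTwiceInARow (line : String) : Bool :=
  (PySem.List.enumerate line.toList).any (fun p =>
    decide (p.1 < PySem.Str.len line - 1) &&
    decide (2 ≤ PySem.Str.count line (String.singleton p.2)) &&
    (PySem.Str.pyGet? line (p.1 + 1) == some p.2))

def pat1 (data : List String) : List String :=
  let iterableLines := data
  iterableLines.foldl (fun d line =>
    if !(doesNotContainIllegalCharacters line && hasThreeCheckVowels line &&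
         hasLetterTwiceInARow line) then
      d.erase line
    else d) data

-- ===== PORT B =====
def pat1_alt (data : List String) : List String :=
  data.foldl (fun kept line =>
    let st := line.toList.foldl
      (fun (s : Option Char × Int × Bool × Bool) ch =>
        let v := if "aeiou".toList.contains ch then s.2.1 + 1 else s.2.1
        let d := if s.1 == some ch then true else s.2.2.1
        let b := if (match s.1 with
                     | some p => [('a','b'),('c','d'),('p','q'),('x','y')].contains (p, ch)
                     | none => false) then true else s.2.2.2
        (some ch, v, d, b))
      (none, 0, false, false)
    if decide (3 ≤ st.2.1) && st.2.2.1 && !st.2.2.2 then kept ++ [line] else kept) []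

-- ===== PRECONDITION & SPEC =====
def Spec_pat1 (data : List String) (out : List String) : Prop := out = pat1_alt data
instance (data : List String) (out : List String) : Decidable (Spec_pat1 data out) := by unfold Spec_pat1; infer_instance

-- ===== CLAIM (what is proved, stated in full; the proofs are below) =====
def Claim_equal_pat1 : Prop := ∀ (data : List String), Dom_pat1 data → Spec_pat1 data (pat1 data)

-- ===== LEMMAS AND PROOFS =====

def pvDblFrom (p : Char) : List Char → Bool
  | [] => false
  | c :: t => (p == c) || pvDblFrom c t

def pvBadFrom (p : Char) : List Char → Bool
  | [] => false
  | c :: t => [('a','b'),('c','d'),('p','q'),('x','y')].contains (p, c) || pvBadFrom c t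

def pvVowel (ch : Char) : Bool := "aeiou".toList.contains ch

-- L1/L2: line.count(single char) is List.count
lemma count_go_single (c : Char) : ∀ (l : List Char) (fuel acc : Nat), l.length ≤ fuel →
    PySem.Chars.count.go [c] fuel l acc = acc + l.count c := by
  intro l
  induction l with
  | nil => intro fuel acc _; cases fuel <;> simp [PySem.Chars.count.go]
  | cons h t ih =>
    intro fuel acc hle
    cases fuel with
    | zero => simp at hle
    | succ f =>
      rw [PySem.Chars.count.go]
      by_cases hc : c = h
      · subst hc
        simp only [List.isPrefixOf, BEq.rfl, Bool.true_and, List.isPrefixOf_nil_left, if_true,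
          List.length_cons, List.length_nil, List.drop_succ_cons, List.drop_zero]
        simp only [List.length_cons] at hle
        rw [ih f (acc + 1) (by omega)]
        simp [List.count_cons]
        omega
      · have : ([c].isPrefixOf (h :: t)) = false := by
          simp [List.isPrefixOf, hc]
        rw [this]
        simp only [if_false, Bool.false_eq_true]
        simp only [List.length_cons] at hle
        rw [ih f acc (by omega)]
        simp only [List.count_cons]
        have : (h == c) = false := by simp; exact fun hh => hc hh.symm
        simp [this]

lemma str_count_single (s : String) (c : Char) :
    PySem.Str.count s (String.singleton c) = s.toList.count c := by
  rw [PySem.Str.count_eq, String.toList_singleton, PySem.Chars.count]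
  simp only [List.isEmpty_cons, if_false, Bool.false_eq_true]
  simpa using count_go_single c s.toList s.toList.length 0 le_rfl

-- enumerate membership
lemma mem_enumerate_zero {α : Type} [Inhabited α] (xs : List α) (p : Int × α) :
    p ∈ PySem.List.enumerate xs ↔ ∃ i : Nat, i < xs.length ∧ p.1 = (i : Int) ∧ xs[i]? = some p.2 := by
  obtain ⟨p1, p2⟩ := p
  rw [PySem.List.enumerate_eq_map_pyRange xs default]
  simp only [List.mem_map]
  constructor
  · rintro ⟨j, hj, hjp⟩
    rw [Prod.mk.injEq] at hjp
    obtain ⟨rfl, rfl⟩ := hjp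
    rw [PySem.List.mem_pyRange_one] at hj
    refine ⟨j.toNat, ?_, ?_, ?_⟩
    · simp [PySem.List.len] at hj; omega
    · simp; omega
    · rw [PySem.List.pyGetD_of_nonneg xs default hj.1]
      rw [List.getD_eq_getElem?_getD]
      have : j.toNat < xs.length := by simp [PySem.List.len] at hj; omega
      simp [List.getElem?_eq_getElem this]
  · rintro ⟨i, hi, h1, h2⟩
    refine ⟨(i : Int), ?_, ?_⟩
    · rw [PySem.List.mem_pyRange_one]; simp [PySem.List.len]; omega
    · rw [PySem.List.pyGetD_of_nonneg xs default (by positivity)]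
      rw [List.getD_eq_getElem?_getD]
      simp only [Int.toNat_natCast]
      rw [List.getElem?_eq_getElem hi] at h2
      simp only [Option.some_inj] at h2
      simp only [Prod.mk.injEq]
      rw [List.getElem?_eq_getElem hi]
      simp_all

-- two adjacent equal chars give count ≥ 2
lemma two_le_count_of_adj {cs : List Char} {i : Nat} (h : i + 1 < cs.length)
    (he : cs[i]'(by omega) = cs[i + 1]'h) : 2 ≤ cs.count (cs[i]'(by omega)) := by
  rw [← List.duplicate_iff_two_le_count, List.duplicate_iff_sublist]
  have hd : cs.drop i = cs[i]'(by omega) :: cs.drop (i + 1) := List.drop_eq_getElem_cons (by omega)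
  have hd2 : cs.drop (i + 1) = cs[i + 1]'h :: cs.drop (i + 2) := List.drop_eq_getElem_cons h
  have : [cs[i]'(by omega), cs[i]'(by omega)].Sublist (cs.drop i) := by
    rw [hd, hd2, ← he]
    exact List.Sublist.cons₂ _ (List.Sublist.cons₂ _ (List.nil_sublist _))
  exact this.trans (List.drop_sublist i cs)

-- A's has_letter_twice_in_a_row ↔ adjacent equal pair
lemma twiceA_iff (line : String) :
    hasLetterTwiceInARow line = true ↔
      ∃ i : Nat, i + 1 < line.toList.length ∧ line.toList[i]? = line.toList[i + 1]? := by
  unfold hasLetterTwiceInARow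
  rw [List.any_eq_true]
  constructor
  · rintro ⟨p, hp, hpred⟩
    rw [mem_enumerate_zero] at hp
    obtain ⟨i, hi, h1, h2⟩ := hp
    simp only [Bool.and_eq_true, decide_eq_true_eq, beq_iff_eq] at hpred
    obtain ⟨⟨hlt, -⟩, hget⟩ := hpred
    rw [PySem.Str.len_eq, h1] at hlt
    have hi1 : i + 1 < line.toList.length := by omega
    refine ⟨i, hi1, ?_⟩
    rw [h1] at hget
    have : PySem.Str.pyGet? line ((i : Int) + 1) = line.toList[i + 1]? := by
      have := PySem.Str.pyGet?_natCast line (i + 1)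
      push_cast at this
      exact this
    rw [this] at hget
    rw [hget, h2]
  · rintro ⟨i, hi, heq⟩
    have hi0 : i < line.toList.length := by omega
    rw [List.getElem?_eq_getElem hi0, List.getElem?_eq_getElem hi] at heq
    have he : line.toList[i]'hi0 = line.toList[i+1]'hi := by simpa using heq
    refine ⟨((i : Int), line.toList[i]'hi0), ?_, ?_⟩
    · rw [mem_enumerate_zero]
      exact ⟨i, hi0, rfl, List.getElem?_eq_getElem hi0⟩
    · simp only [Bool.and_eq_true, decide_eq_true_eq, beq_iff_eq]
      refine ⟨⟨?_, ?_⟩, ?_⟩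
      · rw [PySem.Str.len_eq]; push_cast; omega
      · rw [str_count_single]
        exact_mod_cast two_le_count_of_adj hi he
      · have : PySem.Str.pyGet? line ((i : Int) + 1) = line.toList[i + 1]? := by
          have := PySem.Str.pyGet?_natCast line (i + 1)
          push_cast at this
          exact this
        rw [this, List.getElem?_eq_getElem hi, he]

-- B's double flag ↔ adjacent equal pair
lemma dblFrom_iff (cs : List Char) : ∀ p : Char,
    pvDblFrom p cs = true ↔
      ∃ i : Nat, i + 1 < (p :: cs).length ∧ (p :: cs)[i]? = (p :: cs)[i + 1]? := by
  induction cs with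
  | nil => intro p; simp [pvDblFrom]
  | cons c t ih =>
    intro p
    rw [pvDblFrom, Bool.or_eq_true, beq_iff_eq, ih c]
    constructor
    · rintro (rfl | ⟨i, hi, he⟩)
      · exact ⟨0, by simp, by simp⟩
      · exact ⟨i + 1, by simpa using hi, by simpa using he⟩
    · rintro ⟨i, hi, he⟩
      cases i with
      | zero => left; simpa using he
      | succ j => right; exact ⟨j, by simpa using hi, by simpa using he⟩

-- two-char substring ↔ adjacent pair at an index
lemma pair_infix_iff (a b : Char) (cs : List Char) :
    [a, b] <:+: cs ↔ ∃ i : Nat, cs[i]? = some a ∧ cs[i + 1]? = some b := by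
  induction cs with
  | nil => simp
  | cons c t ih =>
    rw [List.infix_cons_iff, ih]
    constructor
    · rintro (hp | ⟨i, h1, h2⟩)
      · rw [List.prefix_cons_iff] at hp
        rcases hp with h | ⟨u, hu, hpre⟩
        · simp at h
        · obtain ⟨rfl, rfl⟩ : a = c ∧ u = [b] := by
            cases hu; exact ⟨rfl, rfl⟩
          refine ⟨0, by simp, ?_⟩
          rcases hpre with ⟨w, hw⟩
          simp [← hw]
      · exact ⟨i + 1, by simpa using h1, by simpa using h2⟩
    · rintro ⟨i, h1, h2⟩
      cases i with
      | zero =>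
        left
        simp only [List.getElem?_cons_zero, Option.some_inj] at h1
        subst h1
        cases t with
        | nil => simp at h2
        | cons d u =>
          simp only [List.getElem?_cons_succ, List.getElem?_cons_zero, Option.some_inj] at h2
          subst h2
          exact ⟨u, rfl⟩
      | succ j => right; exact ⟨j, by simpa using h1, by simpa using h2⟩

def pvPairs : List (Char × Char) := [('a','b'),('c','d'),('p','q'),('x','y')]

lemma badFrom_iff (cs : List Char) : ∀ p : Char,
    pvBadFrom p cs = true ↔
      ∃ q ∈ pvPairs, ∃ i : Nat, (p :: cs)[i]? = some q.1 ∧ (p :: cs)[i + 1]? = some q.2 := by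
  induction cs with
  | nil =>
    intro p
    simp only [pvBadFrom]
    constructor
    · intro h; simp at h
    · rintro ⟨q, hq, i, h1, h2⟩
      cases i <;> simp at h2
  | cons c t ih =>
    intro p
    rw [pvBadFrom, Bool.or_eq_true, ih c]
    constructor
    · rintro (hm | ⟨q, hq, i, h1, h2⟩)
      · rw [List.contains_eq_mem, decide_eq_true_eq] at hm
        exact ⟨(p, c), hm, 0, by simp, by simp⟩
      · exact ⟨q, hq, i + 1, by simpa using h1, by simpa using h2⟩
    · rintro ⟨q, hq, i, h1, h2⟩
      cases i with
      | zero =>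
        left
        rw [List.contains_eq_mem, decide_eq_true_eq]
        simp only [List.getElem?_cons_zero, Option.some_inj] at h1
        simp only [List.getElem?_cons_succ, List.getElem?_cons_zero, Option.some_inj] at h2
        obtain ⟨a, b⟩ := q
        simp only at h1 h2
        subst h1; subst h2
        simpa [pvPairs] using hq
      | succ j => right; exact ⟨q, hq, j, by simpa using h1, by simpa using h2⟩

-- vowel counting
lemma vow_sum (cs : List Char) :
    cs.count 'a' + cs.count 'e' + cs.count 'i' + cs.count 'o' + cs.count 'u'
      = cs.countP pvVowel := by
  induction cs with
  | nil => simp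
  | cons ch t ih =>
    by_cases h : pvVowel ch
    · have hm : ch ∈ ['a','e','i','o','u'] := by
        simpa [pvVowel, List.contains_eq_mem] using h
      fin_cases hm <;>
        simp_all [List.count_cons, List.countP_cons, pvVowel] <;> omega
    · have ha : ch ≠ 'a' ∧ ch ≠ 'e' ∧ ch ≠ 'i' ∧ ch ≠ 'o' ∧ ch ≠ 'u' := by
        simp [pvVowel, List.contains_eq_mem] at h
        tauto
      simp [List.count_cons, ha.1, ha.2.1, ha.2.2.1, ha.2.2.2.1, ha.2.2.2.2,
        List.countP_cons, h, ih]

lemma illegalA_eq (line : String) :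
    doesNotContainIllegalCharacters line
      = !(PySem.Str.isIn "ab" line || PySem.Str.isIn "cd" line ||
          PySem.Str.isIn "pq" line || PySem.Str.isIn "xy" line) := by
  unfold doesNotContainIllegalCharacters
  cases h1 : PySem.Str.isIn "ab" line <;> cases h2 : PySem.Str.isIn "cd" line <;>
    cases h3 : PySem.Str.isIn "pq" line <;> cases h4 : PySem.Str.isIn "xy" line <;>
      simp_all

lemma illegalA_iff (line : String) :
    doesNotContainIllegalCharacters line = false ↔
      ∃ q ∈ pvPairs, ∃ i : Nat, line.toList[i]? = some q.1 ∧ line.toList[i + 1]? = some q.2 := by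
  rw [illegalA_eq]
  simp only [Bool.not_eq_false', Bool.or_eq_true]
  have hab : ("ab" : String).toList = ['a','b'] := by decide
  have hcd : ("cd" : String).toList = ['c','d'] := by decide
  have hpq : ("pq" : String).toList = ['p','q'] := by decide
  have hxy : ("xy" : String).toList = ['x','y'] := by decide
  constructor
  · rintro (((h | h) | h) | h) <;> rw [PySem.Str.isIn_iff_infix] at h
    · rw [hab, pair_infix_iff] at h
      obtain ⟨i, h1, h2⟩ := h
      exact ⟨('a','b'), by simp [pvPairs], i, h1, h2⟩
    · rw [hcd, pair_infix_iff] at h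
      obtain ⟨i, h1, h2⟩ := h
      exact ⟨('c','d'), by simp [pvPairs], i, h1, h2⟩
    · rw [hpq, pair_infix_iff] at h
      obtain ⟨i, h1, h2⟩ := h
      exact ⟨('p','q'), by simp [pvPairs], i, h1, h2⟩
    · rw [hxy, pair_infix_iff] at h
      obtain ⟨i, h1, h2⟩ := h
      exact ⟨('x','y'), by simp [pvPairs], i, h1, h2⟩
  · rintro ⟨q, hq, i, h1, h2⟩
    simp only [pvPairs, List.mem_cons, List.not_mem_nil, or_false] at hq
    rcases hq with rfl | rfl | rfl | rfl
    · exact Or.inl (Or.inl (Or.inl (by rw [PySem.Str.isIn_iff_infix, hab, pair_infix_iff]; exact ⟨i, h1, h2⟩)))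
    · exact Or.inl (Or.inl (Or.inr (by rw [PySem.Str.isIn_iff_infix, hcd, pair_infix_iff]; exact ⟨i, h1, h2⟩)))
    · exact Or.inl (Or.inr (by rw [PySem.Str.isIn_iff_infix, hpq, pair_infix_iff]; exact ⟨i, h1, h2⟩))
    · exact Or.inr (by rw [PySem.Str.isIn_iff_infix, hxy, pair_infix_iff]; exact ⟨i, h1, h2⟩)

lemma h3A_eq (line : String) :
    hasThreeCheckVowels line = decide (3 ≤ (line.toList.countP pvVowel : Int)) := by
  unfold hasThreeCheckVowels
  have hv : ("aeiou" : String).toList = ['a','e','i','o','u'] := by decide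
  rw [hv]
  simp only [List.foldl_cons, List.foldl_nil, str_count_single]
  rw [← vow_sum line.toList]
  rcases Nat.lt_or_ge (line.toList.count 'a' + line.toList.count 'e' + line.toList.count 'i'
    + line.toList.count 'o' + line.toList.count 'u') 3 with h | h
  · have h1 : ¬ (3 : Int) ≤ 0 + ↑(line.toList.count 'a') + ↑(line.toList.count 'e')
        + ↑(line.toList.count 'i') + ↑(line.toList.count 'o') + ↑(line.toList.count 'u') := by
      push_cast; omega
    have h2 : ¬ (3 : Int) ≤ ↑(line.toList.count 'a' + line.toList.count 'e' + line.toList.count 'i'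
        + line.toList.count 'o' + line.toList.count 'u') := by push_cast; omega
    simp [h1, h2]
  · have h1 : (3 : Int) ≤ 0 + ↑(line.toList.count 'a') + ↑(line.toList.count 'e')
        + ↑(line.toList.count 'i') + ↑(line.toList.count 'o') + ↑(line.toList.count 'u') := by
      push_cast; omega
    have h2 : (3 : Int) ≤ ↑(line.toList.count 'a' + line.toList.count 'e' + line.toList.count 'i'
        + line.toList.count 'o' + line.toList.count 'u') := by push_cast; omega
    simp [h1, h2]

def pvStep (s : Option Char × Int × Bool × Bool) (ch : Char) : Option Char × Int × Bool × Bool :=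
  let v := if "aeiou".toList.contains ch then s.2.1 + 1 else s.2.1
  let d := if s.1 == some ch then true else s.2.2.1
  let b := if (match s.1 with
               | some p => [('a','b'),('c','d'),('p','q'),('x','y')].contains (p, ch)
               | none => false) then true else s.2.2.2
  (some ch, v, d, b)

lemma foldB (cs : List Char) : ∀ (p : Char) (v : Int) (d b : Bool),
    cs.foldl pvStep (some p, v, d, b)
      = (some (cs.getLastD p), v + (cs.countP pvVowel : Int),
         d || pvDblFrom p cs, b || pvBadFrom p cs) := by
  induction cs with
  | nil => intro p v d b; simp [pvDblFrom, pvBadFrom]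
  | cons c t ih =>
    intro p v d b
    rw [List.foldl_cons]
    have hstep : pvStep (some p, v, d, b) c
        = (some c, (if pvVowel c then v + 1 else v), (p == c) || d,
           ([('a','b'),('c','d'),('p','q'),('x','y')].contains (p, c)) || b) := by
      unfold pvStep pvVowel
      simp only [Option.some_beq_some]
      cases hpc : (p == c) <;> cases hbp : [('a','b'),('c','d'),('p','q'),('x','y')].contains (p, c) <;>
        simp only [hpc, hbp, if_true, if_false, Bool.false_eq_true, Bool.true_eq_false,
          Bool.true_or, Bool.false_or, Bool.or_true, Bool.or_false, if_true_left] <;> rfl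
    rw [hstep, ih c]
    simp only [List.getLastD_cons, pvDblFrom, pvBadFrom, List.countP_cons]
    refine Prod.ext rfl (Prod.ext ?_ (Prod.ext ?_ ?_)) <;> simp only
    · cases hv : pvVowel c <;> simp [hv] <;> push_cast <;> ring
    · cases p == c <;> cases d <;> simp
    · cases [('a','b'),('c','d'),('p','q'),('x','y')].contains (p, c) <;> cases b <;> simp

def pvKeep (line : String) : Bool :=
  let st := line.toList.foldl pvStep (none, 0, false, false)
  decide (3 ≤ st.2.1) && st.2.2.1 && !st.2.2.2

def pvCond (line : String) : Bool :=
  doesNotContainIllegalCharacters line && hasThreeCheckVowels line && hasLetterTwiceInARow line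

lemma twA_eq (line : String) (c : Char) (t : List Char) (hcs : line.toList = c :: t) :
    hasLetterTwiceInARow line = pvDblFrom c t := by
  rw [Bool.eq_iff_iff, twiceA_iff, dblFrom_iff t c, hcs]

lemma dnA_eq (line : String) (c : Char) (t : List Char) (hcs : line.toList = c :: t) :
    doesNotContainIllegalCharacters line = !pvBadFrom c t := by
  cases hB : pvBadFrom c t with
  | true =>
    obtain ⟨q, hq, i, h1, h2⟩ := (badFrom_iff t c).1 hB
    have : doesNotContainIllegalCharacters line = false := by
      rw [illegalA_iff, hcs]
      exact ⟨q, hq, i, h1, h2⟩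
    rw [this]; rfl
  | false =>
    cases hD : doesNotContainIllegalCharacters line with
    | true => rfl
    | false =>
      have h := (illegalA_iff line).1 hD
      rw [hcs] at h
      obtain ⟨q, hq, i, h1, h2⟩ := h
      have : pvBadFrom c t = true := (badFrom_iff t c).2 ⟨q, hq, i, h1, h2⟩
      rw [this] at hB
      cases hB

lemma keepB_eq (line : String) : pvKeep line = pvCond line := by
  unfold pvKeep pvCond
  cases hcs : line.toList with
  | nil =>
    simp only [hcs, List.foldl_nil]
    rw [h3A_eq, hcs]
    simp
  | cons c t =>
    simp only [hcs, List.foldl_cons]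
    have hfirst : pvStep (none, 0, false, false) c
        = (some c, (if pvVowel c then (1 : Int) else 0), false, false) := by
      unfold pvStep pvVowel
      cases hv : "aeiou".toList.contains c <;> simp [hv]
    simp only [hfirst, foldB]
    have hcnt : ((if pvVowel c then (1 : Int) else 0) + (t.countP pvVowel : Int))
        = ((c :: t).countP pvVowel : Int) := by
      rw [List.countP_cons]
      cases hv : pvVowel c <;> simp [hv] <;> push_cast <;> ring
    rw [h3A_eq, hcs, twA_eq line c t hcs, dnA_eq line c t hcs]
    simp only [Bool.false_or]
    rw [hcnt]
    cases decide (3 ≤ ((c :: t).countP pvVowel : Int)) <;>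
      cases pvDblFrom c t <;> cases pvBadFrom c t <;> rfl

lemma removeFold (cond : String → Bool) : ∀ (rest acc : List String),
    (∀ x ∈ acc, cond x = true) →
    rest.foldl (fun d line => if !(cond line) then d.erase line else d) (acc ++ rest)
      = acc ++ rest.filter cond := by
  intro rest
  induction rest with
  | nil => intro acc _; simp
  | cons line rest ih =>
    intro acc hacc
    rw [List.foldl_cons]
    cases hc : cond line with
    | true =>
      simp only [hc, Bool.not_true, Bool.false_eq_true, if_false]
      have hsplit : acc ++ line :: rest = (acc ++ [line]) ++ rest := by simp
      rw [hsplit, ih (acc ++ [line]) ?_]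
      · simp [List.filter_cons, hc]
      · intro x hx
        rcases List.mem_append.1 hx with h | h
        · exact hacc x h
        · simp only [List.mem_singleton] at h; subst h; exact hc
    | false =>
      simp only [hc, Bool.not_false, if_true]
      have hne : line ∉ acc := fun h => by rw [hacc line h] at hc; cases hc
      rw [List.erase_append_right _ hne, List.erase_cons_head, ih acc hacc]
      simp [List.filter_cons, hc]

-- ===== VERDICT (by name: the statement is the Claim_ definition above) =====
theorem pat1_spec : Claim_equal_pat1 := by
  intro data _
  unfold Spec_pat1
  have hA : pat1 data
      = data.foldl (fun d line => if !(pvCond line) then d.erase line else d) data := rfl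
  have hB : pat1_alt data
      = data.foldl (fun kept line => if pvKeep line then kept ++ [line] else kept) [] := rfl
  rw [hA, hB, PySem.List.foldl_append_if_eq_filter, List.nil_append]
  have := removeFold pvCond data [] (by intro x hx; simp at hx)
  rw [List.nil_append] at this
  rw [this, List.nil_append]
  exact List.filter_congr fun x _ => (keepB_eq x).symm
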